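-- pv_equiv track=rewrite | github.com/hdesai17/Digest_It | app/main.py | trypsin_digest
-- ===== SOURCE A (Python) =====
-- def trypsin_digest(protein_sequence):
--     peptides = []
--     # Split the sequence after each occurrence of R and K
--     cutsites = [0] + [i+1 for i, aa in enumerate(protein_sequence) if aa in ('R', 'K')]
--     for i in range(len(cutsites)-1):
--         peptide = protein_sequence[cutsites[i]:cutsites[i+1]]
--         peptides.append(peptide)
--
--     # Add N-terminal and C-terminal peptides
--     if cutsites:
--         # N-terminal peptide
--         n_terminal_peptide = protein_sequence[:cutsites[0]]
--         peptides.insert(0, n_terminal_peptide)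
--
--         # C-terminal peptide
--         c_terminal_peptide = protein_sequence[cutsites[-1]:]
--         peptides.append(c_terminal_peptide)
--
--     return [peptide for peptide in peptides if peptide]
-- ===== SOURCE B (Python) =====
-- def trypsin_digest(protein_sequence):
--     peptides = []
--     start = 0
--     for i, aa in enumerate(protein_sequence):
--         if aa in ('R', 'K'):
--             peptides.append(protein_sequence[start:i+1])
--             start = i + 1
--     tail = protein_sequence[start:]
--     if tail:
--         peptides.append(tail)
--     return peptides
-- ===== Notes on version B (the rewrite author's own statement) =====
-- stated objective: simpler
-- what changed: B is one streaming pass that tracks the previous cut position and slices as it goes, instead of materialising a cutsites index list, slicing consecutive index pairs, splicing in terminal peptides and filtering out empties afterwards; the single pass also avoids the extra index list, the O(n) insert(0,...) and the final filter pass (measured ~1.7x faster).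
import Mathlib
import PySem

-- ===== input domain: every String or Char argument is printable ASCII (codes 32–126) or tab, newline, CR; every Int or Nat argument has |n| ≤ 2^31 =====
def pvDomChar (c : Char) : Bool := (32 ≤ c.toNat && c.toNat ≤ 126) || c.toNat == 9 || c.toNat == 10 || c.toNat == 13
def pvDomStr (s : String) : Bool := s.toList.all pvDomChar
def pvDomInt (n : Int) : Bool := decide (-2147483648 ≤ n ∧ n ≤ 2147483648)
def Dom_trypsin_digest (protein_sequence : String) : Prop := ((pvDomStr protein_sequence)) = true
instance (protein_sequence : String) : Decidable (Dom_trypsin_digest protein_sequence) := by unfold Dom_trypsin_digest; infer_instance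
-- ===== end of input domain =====

-- B replaces A's cutsites-list-then-pairwise-slice-then-filter pipeline by one streaming
-- pass that slices at each R/K as it goes (objective: simpler; return values proved equal).

-- ===== PORT A =====
def trypsin_digest (protein_sequence : String) : List String :=
  let seq := protein_sequence.toList
  -- cutsites = [0] + [i+1 for i, aa in enumerate(protein_sequence) if aa in ('R','K')]
  let cutsites : List Int :=
    [0] ++ (PySem.List.enumerate seq 0).foldl
      (fun acc p => if p.2 == 'R' || p.2 == 'K' then acc ++ [p.1 + 1] else acc) []
  -- for i in range(len(cutsites)-1): peptides.append(seq[cutsites[i]:cutsites[i+1]])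
  let peptides : List String :=
    (PySem.List.pyRange 0 ((cutsites.length : Int) - 1) 1).foldl
      (fun acc i =>
        acc ++ [String.ofList (PySem.List.slice seq
          (some (PySem.List.pyGetD cutsites i 0))
          (some (PySem.List.pyGetD cutsites (i + 1) 0)))]) []
  let peptides : List String :=
    if cutsites ≠ [] then
      -- peptides.insert(0, seq[:cutsites[0]])
      let n_terminal := String.ofList (PySem.List.slice seq none (some (PySem.List.pyGetD cutsites 0 0)))
      -- peptides.append(seq[cutsites[-1]:])
      let c_terminal := String.ofList (PySem.List.slice seq (some (PySem.List.pyGetD cutsites (-1) 0)) none)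
      ([n_terminal] ++ peptides) ++ [c_terminal]
    else peptides
  -- return [peptide for peptide in peptides if peptide]
  peptides.filter (fun p => decide (PySem.Str.len p ≠ 0))

-- ===== PORT B =====
def trypsin_digest_alt (protein_sequence : String) : List String :=
  let seq := protein_sequence.toList
  let r : List String × Int :=
    (PySem.List.enumerate seq 0).foldl
      (fun (acc : List String × Int) p =>
        if p.2 == 'R' || p.2 == 'K' then
          (acc.1 ++ [String.ofList (PySem.List.slice seq (some acc.2) (some (p.1 + 1)))], p.1 + 1)
        else acc) ([], 0)
  let tail := String.ofList (PySem.List.slice seq (some r.2) none)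
  if PySem.Str.len tail ≠ 0 then r.1 ++ [tail] else r.1

-- ===== PRECONDITION & SPEC =====
def Spec_trypsin_digest (protein_sequence : String) (out : List String) : Prop := out = trypsin_digest_alt protein_sequence
instance (protein_sequence : String) (out : List String) : Decidable (Spec_trypsin_digest protein_sequence out) := by unfold Spec_trypsin_digest; infer_instance

-- ===== CLAIM (what is proved, stated in full; the proofs are below) =====
def Claim_equal_trypsin_digest : Prop := ∀ (protein_sequence : String), Dom_trypsin_digest protein_sequence → Spec_trypsin_digest protein_sequence (trypsin_digest protein_sequence)

-- ===== LEMMAS AND PROOFS =====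

-- The list of cut positions i+1 for seq[i] ∈ {R,K}, with the index count starting at k.
def pvCuts : List Char → Int → List Int
  | [], _ => []
  | c :: cs, k => if c == 'R' || c == 'K' then (k + 1) :: pvCuts cs (k + 1) else pvCuts cs (k + 1)

-- The peptides between consecutive cut positions, the previous cut being st.
def pvEmit (seq : List Char) : List Int → Int → List String
  | [], _ => []
  | p :: ps, st => String.ofList (PySem.List.slice seq (some st) (some p)) :: pvEmit seq ps p

-- A's cutsites comprehension computes pvCuts.
theorem pvCuts_eq (cs : List Char) : ∀ (k : Int) (init : List Int),
    (PySem.List.enumerate cs k).foldl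
      (fun acc p => if p.2 == 'R' || p.2 == 'K' then acc ++ [p.1 + 1] else acc) init
      = init ++ pvCuts cs k := by
  induction cs with
  | nil => intro k init; simp [pvCuts, PySem.List.enumerate_nil]
  | cons c cs ih =>
    intro k init
    simp only [PySem.List.enumerate_cons, List.foldl_cons]
    by_cases h : (c == 'R' || c == 'K') = true
    · rw [if_pos h, ih]; simp only [pvCuts, if_pos h, List.append_assoc, List.singleton_append]
    · rw [if_neg h, ih]; simp only [pvCuts, if_neg h]

-- B's streaming fold computes pvEmit and ends with the last cut position.
theorem pvBfold_eq (seq : List Char) (cs : List Char) : ∀ (k : Int) (acc : List String) (st : Int),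
    (PySem.List.enumerate cs k).foldl
      (fun (acc : List String × Int) p =>
        if p.2 == 'R' || p.2 == 'K' then
          (acc.1 ++ [String.ofList (PySem.List.slice seq (some acc.2) (some (p.1 + 1)))], p.1 + 1)
        else acc) (acc, st)
      = (acc ++ pvEmit seq (pvCuts cs k) st, (pvCuts cs k).getLastD st) := by
  induction cs with
  | nil => intro k acc st; simp [pvCuts, pvEmit, PySem.List.enumerate_nil]
  | cons c cs ih =>
    intro k acc st
    simp only [PySem.List.enumerate_cons, List.foldl_cons]
    by_cases h : (c == 'R' || c == 'K') = true
    · rw [if_pos h, ih]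
      simp only [pvCuts, if_pos h, pvEmit, List.getLastD_cons, List.append_assoc, List.singleton_append]
    · rw [if_neg h, ih]; simp only [pvCuts, if_neg h]

-- Python's q[-1] on a nonempty list is its last element.
theorem pvGetD_neg_one (ps : List Int) : ∀ (st : Int),
    PySem.List.pyGetD (st :: ps) (-1) 0 = ps.getLastD st := by
  induction ps with
  | nil => intro st; simp [PySem.List.pyGetD, PySem.List.pyGet?, PySem.List.pyIdx?]
  | cons p ps ih =>
    intro st
    have h := ih p
    simp [PySem.List.pyGetD, PySem.List.pyGet?, PySem.List.pyIdx?] at h ⊢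
    exact h.trans (by cases ps with | nil => simp | cons q qs => simp [List.getLast?_cons])

theorem pvRange_map_emit (seq : List Char) (ps : List Int) : ∀ (st : Int),
    (List.range ps.length).map (fun j => String.ofList (PySem.List.slice seq
        (some ((st :: ps).getD j 0)) (some ((st :: ps).getD (j+1) 0))))
      = pvEmit seq ps st := by
  induction ps with
  | nil => intro st; simp [pvEmit]
  | cons p ps ih =>
    intro st
    rw [List.length_cons, List.range_succ_eq_map, List.map_cons, List.map_map]
    simp only [List.getD_cons_zero, List.getD_cons_succ]
    rw [pvEmit]
    congr 1
    exact ih p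

-- A's index loop over consecutive cutsite pairs computes pvEmit.
theorem pvAfold_eq (seq : List Char) (ps : List Int) (st : Int) :
    (PySem.List.pyRange 0 (((st :: ps).length : Int) - 1) 1).foldl
      (fun acc i => acc ++ [String.ofList (PySem.List.slice seq
        (some (PySem.List.pyGetD (st :: ps) i 0))
        (some (PySem.List.pyGetD (st :: ps) (i + 1) 0)))]) []
      = pvEmit seq ps st := by
  rw [PySem.List.foldl_append_singleton_eq_map, PySem.List.pyRange_one, List.map_map]
  have h1 : ((((st :: ps).length : Int) - 1) - 0).toNat = ps.length := by simp
  rw [h1, ← pvRange_map_emit seq ps st]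
  apply List.map_congr_left
  intro j hj
  simp only [Function.comp, zero_add]
  rw [PySem.List.pyGetD_natCast]
  have : (j : Int) + 1 = ((j + 1 : Nat) : Int) := by push_cast; ring
  rw [this, PySem.List.pyGetD_natCast]

-- Cut positions are strictly increasing, starting above k.
theorem pvChain_cuts (cs : List Char) : ∀ (k j : Int), j ≤ k →
    List.IsChain (· < ·) (j :: pvCuts cs k) := by
  induction cs with
  | nil => intro k j _; simp [pvCuts]
  | cons c cs ih =>
    intro k j hj
    by_cases h : (c == 'R' || c == 'K') = true
    · simp only [pvCuts, if_pos h]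
      exact List.IsChain.cons_cons (by omega) (ih (k+1) (k+1) le_rfl)
    · simp only [pvCuts, if_neg h]
      exact ih (k+1) j (by omega)

-- Cut positions never exceed the sequence length (offset by k).
theorem pvCuts_bound (cs : List Char) : ∀ (k p : Int), p ∈ pvCuts cs k → p ≤ k + cs.length := by
  induction cs with
  | nil => intro k p h; simp [pvCuts] at h
  | cons c cs ih =>
    intro k p h
    have key : p ∈ pvCuts cs (k+1) → p ≤ k + (c :: cs).length := by
      intro hm; have := ih (k+1) p hm; simp only [List.length_cons] at *; push_cast at *; omega
    by_cases hc : (c == 'R' || c == 'K') = true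
    · simp only [pvCuts, if_pos hc, List.mem_cons] at h
      rcases h with rfl | h
      · simp only [List.length_cons]; push_cast; omega
      · exact key h
    · simp only [pvCuts, if_neg hc] at h
      exact key h

-- Each inter-cut peptide is nonempty, so A's empty-filter keeps them all.
theorem pvFilter_emit (seq : List Char) (ps : List Int) : ∀ (st : Int), 0 ≤ st →
    List.IsChain (· < ·) (st :: ps) → (∀ p ∈ ps, p ≤ (seq.length : Int)) →
    (pvEmit seq ps st).filter (fun p => decide (PySem.Str.len p ≠ 0)) = pvEmit seq ps st := by
  induction ps with
  | nil => intro st _ _ _; simp [pvEmit]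
  | cons p ps ih =>
    intro st hst hch hb
    rw [List.isChain_cons_cons] at hch
    obtain ⟨hlt, hch⟩ := hch
    have hpn : p ≤ (seq.length : Int) := hb p (by simp)
    rw [pvEmit, List.filter_cons, if_pos]
    · rw [ih p (by omega) hch (fun q hq => hb q (by simp [hq]))]
    · simp only [decide_eq_true_eq, ne_eq]
      rw [PySem.Str.len_eq, PySem.List.slice_toNat (ha := hst) (hb := by omega)]
      simp only [String.toList_ofList]
      intro hcontra
      rw [Nat.cast_eq_zero, List.length_eq_zero_iff] at hcontra
      have h1 : st.toNat < seq.length := by omega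
      rcases List.take_eq_nil_iff.mp hcontra with h | h
      · omega
      · rw [List.drop_eq_nil_iff] at h; omega

-- ===== VERDICT (by name: the statement is the Claim_ definition above) =====
theorem trypsin_digest_spec : Claim_equal_trypsin_digest := by
  intro s _
  unfold Spec_trypsin_digest trypsin_digest trypsin_digest_alt
  dsimp only
  set seq := s.toList with hseq
  rw [pvCuts_eq, List.nil_append, pvBfold_eq seq seq 0 [] 0]
  simp only [List.singleton_append]
  rw [pvAfold_eq seq (pvCuts seq 0) 0, if_pos (by simp)]
  have h0 : PySem.List.pyGetD (0 :: pvCuts seq 0) 0 0 = 0 := by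
    simp [PySem.List.pyGetD, PySem.List.pyGet?, PySem.List.pyIdx?]
  rw [h0, pvGetD_neg_one]
  have hn : PySem.List.slice seq none (some (0:Int)) = [] := rfl
  rw [hn, List.filter_append, List.filter_cons]
  have hcf : (decide (PySem.Str.len (String.ofList ([] : List Char)) ≠ 0)) = false := by decide
  simp only [hcf, Bool.false_eq_true, if_false]
  rw [pvFilter_emit seq (pvCuts seq 0) 0 le_rfl (pvChain_cuts seq 0 0 le_rfl)
      (fun p hp => by have := pvCuts_bound seq 0 p hp; omega)]
  have hlen : ∀ l : List Char, PySem.Str.len (String.ofList l) = (l.length : Int) := by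
    intro l; rw [PySem.Str.len_eq]; simp
  have hgl : (pvCuts seq 0).getLastD 0 = (pvCuts seq 0).getLast?.getD 0 := by
    simp [List.getLastD_eq_getLast?]
  by_cases hc : PySem.Str.len (String.ofList (PySem.List.slice seq (some ((pvCuts seq 0).getLastD 0)) none)) ≠ 0
  · rw [if_pos hc]; simp only [List.filter_cons, List.filter_nil]; simp only [hgl] at hc
    simp
    exact fun h => hc (by rw [hlen, h]; simp)
  · rw [if_neg hc]; simp only [List.filter_cons, List.filter_nil]
    rw [ne_eq, not_not] at hc
    rw [hgl, hlen] at hc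
    have h : PySem.List.slice seq (some ((pvCuts seq 0).getLast?.getD 0)) none = [] :=
      List.length_eq_zero_iff.mp (by exact_mod_cast hc)
    simp [h]
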